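-- pv_equiv track=rewrite | github.com/teeaychem/smt | diversions/sudoku.py | cells
-- ===== SOURCE A (Python) =====
-- def cells(row_max, col_max):
--     row = 1
--     col = 1
--     while row <= row_max and col <= col_max:
--         yield (row, col)
--
--         if col == col_max:
--             col = 1
--             row += 1
--         else:
--             col += 1
-- ===== SOURCE B (Python) =====
-- def cells(row_max, col_max):
--     if col_max < 1:
--         return
--     for row in range(1, row_max + 1):
--         for col in range(1, col_max + 1):
--             yield (row, col)
-- ===== Notes on version B (the rewrite author's own statement) =====
-- stated objective: simpler
-- what changed: Replaced the flattened while-loop with a manual (row, col) pointer and reset/increment branching by two nested for-loops over ranges, which yield the same row-major order directly.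
import Mathlib
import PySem

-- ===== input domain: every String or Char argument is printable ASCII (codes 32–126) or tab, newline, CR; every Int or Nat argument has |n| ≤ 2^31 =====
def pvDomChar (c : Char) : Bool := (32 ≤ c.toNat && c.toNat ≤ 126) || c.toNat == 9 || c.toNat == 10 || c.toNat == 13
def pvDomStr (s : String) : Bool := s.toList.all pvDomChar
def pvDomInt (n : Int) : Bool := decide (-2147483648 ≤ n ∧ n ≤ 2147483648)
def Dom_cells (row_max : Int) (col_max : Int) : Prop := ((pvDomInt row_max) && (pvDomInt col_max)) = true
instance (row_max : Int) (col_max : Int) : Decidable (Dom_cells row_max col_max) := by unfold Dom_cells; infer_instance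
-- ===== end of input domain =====

-- B replaces A's flattened while-loop with a manual (row, col) pointer by two nested range loops; objective: simpler.

-- ===== PORT A =====
-- A's while-loop: state (row, col), branches in A's order; the Nat fuel is only a
-- totality guard (the fuel passed by `cells` exceeds the loop's iteration count).
def cellsLoop (row_max col_max : Int) : Nat → Int → Int → List (Int × Int)
  | 0, _, _ => []
  | fuel + 1, row, col =>
      if row ≤ row_max ∧ col ≤ col_max then
        (row, col) ::
          (if col = col_max then cellsLoop row_max col_max fuel (row + 1) 1
           else cellsLoop row_max col_max fuel row (col + 1))
      else []

def cells (row_max : Int) (col_max : Int) : List (Int × Int) :=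
  cellsLoop row_max col_max (row_max.toNat * col_max.toNat + 1) 1 1

-- ===== PORT B =====
def cells_alt (row_max : Int) (col_max : Int) : List (Int × Int) :=
  if col_max < 1 then []
  else (PySem.List.pyRange 1 (row_max + 1) 1).flatMap (fun row =>
    (PySem.List.pyRange 1 (col_max + 1) 1).map (fun col => (row, col)))

-- ===== PRECONDITION & SPEC =====
def Spec_cells (row_max : Int) (col_max : Int) (out : List (Int × Int)) : Prop := out = cells_alt row_max col_max
instance (row_max : Int) (col_max : Int) (out : List (Int × Int)) : Decidable (Spec_cells row_max col_max out) := by unfold Spec_cells; infer_instance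

-- ===== CLAIM (what is proved, stated in full; the proofs are below) =====
def Claim_equal_cells : Prop := ∀ (row_max : Int) (col_max : Int), Dom_cells row_max col_max → Spec_cells row_max col_max (cells row_max col_max)

-- ===== LEMMAS AND PROOFS =====

-- B's inner pass over the remaining rows, starting at `row`
def cellsRows (row_max col_max row : Int) : List (Int × Int) :=
  (PySem.List.pyRange row (row_max + 1) 1).flatMap (fun r =>
    (PySem.List.pyRange 1 (col_max + 1) 1).map (fun c => (r, c)))

-- main invariant of A's loop: with enough fuel, from (row, col) it produces the rest
-- of the current row followed by all later rows
theorem cellsLoop_inv (row_max col_max : Int) (hcm : 1 ≤ col_max) :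
    ∀ (fuel : Nat) (row col : Int), 1 ≤ col → col ≤ col_max →
      (row ≤ row_max →
        (row_max - row).toNat * col_max.toNat + (col_max - col).toNat + 1 ≤ fuel) →
      cellsLoop row_max col_max fuel row col =
        if row ≤ row_max then
          ((PySem.List.pyRange col (col_max + 1) 1).map (fun c => (row, c))) ++
            cellsRows row_max col_max (row + 1)
        else [] := by
  intro fuel
  induction fuel with
  | zero =>
      intro row col h1 h2 hf
      have hr : ¬ row ≤ row_max := by intro h; have := hf h; omega
      simp [cellsLoop, hr]
  | succ fuel ih =>
      intro row col h1 h2 hf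
      by_cases hr : row ≤ row_max
      · rw [if_pos hr]
        have hfuel := hf hr
        by_cases hcol : col = col_max
        · -- end of the row: reset col, advance row
          rw [cellsLoop, if_pos ⟨hr, h2⟩, if_pos hcol]
          rw [ih (row + 1) 1 le_rfl hcm
              (by intro hr1
                  have he : (row_max - row).toNat = (row_max - (row + 1)).toNat + 1 := by omega
                  rw [he, Nat.succ_mul] at hfuel
                  omega)]
          by_cases hr1 : row + 1 ≤ row_max
          · rw [if_pos hr1]
            rw [PySem.List.pyRange_one_cons (by omega : col < col_max + 1),
                PySem.List.pyRange_one_eq_nil (by omega : col_max + 1 ≤ col + 1)]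
            unfold cellsRows
            rw [PySem.List.pyRange_one_cons (by omega : row + 1 < row_max + 1)]
            simp
          · rw [if_neg hr1]
            rw [PySem.List.pyRange_one_cons (by omega : col < col_max + 1),
                PySem.List.pyRange_one_eq_nil (by omega : col_max + 1 ≤ col + 1)]
            unfold cellsRows
            rw [PySem.List.pyRange_one_eq_nil (by omega : row_max + 1 ≤ row + 1)]
            simp
        · -- continue along the row
          have hlt : col < col_max := by omega
          rw [cellsLoop, if_pos ⟨hr, h2⟩, if_neg hcol]
          rw [ih row (col + 1) (by omega) (by omega) (by intro _; omega)]
          rw [if_pos hr]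
          rw [PySem.List.pyRange_one_cons (by omega : col < col_max + 1)]
          simp
      · rw [if_neg hr, cellsLoop, if_neg (by omega : ¬ (row ≤ row_max ∧ col ≤ col_max))]

-- ===== VERDICT (by name: the statement is the Claim_ definition above) =====
theorem cells_spec : Claim_equal_cells := by
  intro row_max col_max _
  unfold Spec_cells cells cells_alt
  by_cases hcm : 1 ≤ col_max
  · rw [if_neg (by omega : ¬ col_max < 1)]
    rw [cellsLoop_inv row_max col_max hcm _ 1 1 le_rfl hcm
        (by intro hr
            have he : row_max.toNat = (row_max - 1).toNat + 1 := by omega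
            rw [he, Nat.succ_mul]
            omega)]
    by_cases hr : 1 ≤ row_max
    · rw [if_pos hr]
      rw [PySem.List.pyRange_one_cons (by omega : (1:Int) < row_max + 1)]
      unfold cellsRows
      simp
    · rw [if_neg hr]
      rw [PySem.List.pyRange_one_eq_nil (by omega : row_max + 1 ≤ 1)]
      simp
  · -- no columns: A's loop exits at once, B returns [] by its guard
    rw [cellsLoop]
    rw [if_neg (by omega : ¬ ((1:Int) ≤ row_max ∧ (1:Int) ≤ col_max)),
        if_pos (by omega : col_max < 1)]
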